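-- pv_equiv track=rewrite | github.com/MauriceCalvert/andante | motifs/tail_generator.py | _is_oscillating
-- ===== SOURCE A (Python) =====
-- def _is_oscillating(intervals: tuple[int, ...]) -> bool:
--     """Check if intervals create boring oscillation (e.g., +1,-1,+1,-1)."""
--     if len(intervals) < 4:
--         return False
--     # Check for repeated 2-interval pattern
--     for i in range(len(intervals) - 3):
--         a, b, c, d = intervals[i:i+4]
--         if a == c and b == d and a == -b:
--             return True
--     return False
-- ===== SOURCE B (Python) =====
-- def _is_oscillating(intervals: tuple[int, ...]) -> bool:
--     """Check if intervals create boring oscillation (e.g., +1,-1,+1,-1)."""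
--     # The 4-window test (a == c and b == d and a == -b) holds iff the three
--     # adjacent pairs in the window are all negations; so scan once, counting
--     # consecutive adjacent-negation pairs, and report a run of 3.
--     count = 0
--     for x, y in zip(intervals, intervals[1:]):
--         if x == -y:
--             count += 1
--             if count == 3:
--                 return True
--         else:
--             count = 0
--     return False
-- ===== Notes on version B (the rewrite author's own statement) =====
-- stated objective: simpler
-- what changed: Replaces the indexed scan over 4-tuple windows (slice, unpack, three equality tests per window) by a single pass over adjacent pairs that counts consecutive adjacent-negation relations and succeeds when the run length reaches 3.
import Mathlib
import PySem

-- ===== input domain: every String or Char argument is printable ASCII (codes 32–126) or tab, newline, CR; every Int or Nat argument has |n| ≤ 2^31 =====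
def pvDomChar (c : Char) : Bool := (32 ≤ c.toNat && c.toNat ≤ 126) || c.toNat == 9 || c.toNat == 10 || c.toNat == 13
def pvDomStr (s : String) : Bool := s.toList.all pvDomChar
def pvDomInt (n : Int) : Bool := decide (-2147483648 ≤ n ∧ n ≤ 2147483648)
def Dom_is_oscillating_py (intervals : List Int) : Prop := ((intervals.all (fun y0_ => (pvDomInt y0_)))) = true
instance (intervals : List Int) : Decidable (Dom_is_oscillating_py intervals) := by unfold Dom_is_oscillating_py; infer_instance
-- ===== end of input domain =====

-- B replaces A's 4-tuple-window scan by a single pass counting consecutive adjacent-negation pairs (objective: simpler).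


-- ===== PORT A =====
-- the body of A's loop: unpack intervals[i:i+4] as a,b,c,d and test the window
def wcheck : List Int → Bool
  | [a, b, c, d] => a == c && b == d && a == -b
  | _ => false

def is_oscillating_py (intervals : List Int) : Bool :=
  if intervals.length < 4 then false
  else (PySem.List.pyRange 0 ((intervals.length : Int) - 3) 1).any
    (fun i => wcheck (PySem.List.slice intervals (some i) (some (i + 4))))

-- ===== PORT B =====
-- B's loop over zip(intervals, intervals[1:]) with the running counter of negation pairs
def altGo : List Int → Nat → Bool
  | x :: y :: rest, cnt =>
      if x == -y then
        (if cnt + 1 == 3 then true else altGo (y :: rest) (cnt + 1))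
      else altGo (y :: rest) 0
  | _, _ => false

def is_oscillating_py_alt (intervals : List Int) : Bool := altGo intervals 0

-- ===== PRECONDITION & SPEC =====
def Spec_is_oscillating_py (intervals : List Int) (out : Bool) : Prop := out = is_oscillating_py_alt intervals
instance (intervals : List Int) (out : Bool) : Decidable (Spec_is_oscillating_py intervals out) := by unfold Spec_is_oscillating_py; infer_instance

-- ===== CLAIM (what is proved, stated in full; the proofs are below) =====
def Claim_equal_is_oscillating_py : Prop := ∀ (intervals : List Int), Dom_is_oscillating_py intervals → Spec_is_oscillating_py intervals (is_oscillating_py intervals)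

-- ===== LEMMAS AND PROOFS =====

-- common characterisation: some 4-window consists of three adjacent negations
def hasOsc : List Int → Bool
  | a :: b :: c :: d :: rest => (a == -b && b == -c && c == -d) || hasOsc (b :: c :: d :: rest)
  | _ => false

-- the first k adjacent pairs are negations
def prefNeg : List Int → Nat → Bool
  | _, 0 => true
  | x :: y :: r, k + 1 => x == -y && prefNeg (y :: r) k
  | _, _ + 1 => false

lemma win3 (a b c d : Int) :
    (a == c && b == d && a == -b) = (a == -b && (b == -c && c == -d)) := by
  rw [Bool.eq_iff_iff]
  simp only [Bool.and_eq_true, beq_iff_eq]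
  constructor <;> intro h <;> omega

lemma prefNeg_succ_imp (l : List Int) (k : Nat) (h : prefNeg l (k + 1) = true) :
    prefNeg l k = true := by
  induction l generalizing k with
  | nil => simp [prefNeg] at h
  | cons x l ih =>
    cases l with
    | nil => simp [prefNeg] at h
    | cons y r =>
      cases k with
      | zero => rfl
      | succ k =>
        simp only [prefNeg, Bool.and_eq_true] at h ⊢
        exact ⟨h.1, ih k h.2⟩

lemma hasOsc_cons (x y : Int) (r : List Int) :
    hasOsc (x :: y :: r) = (prefNeg (x :: y :: r) 3 || hasOsc (y :: r)) := by
  match r with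
  | [] => simp [hasOsc, prefNeg]
  | [c] => simp [hasOsc, prefNeg]
  | c :: d :: rest => simp [hasOsc, prefNeg, Bool.and_assoc]

lemma prefNeg_or_hasOsc (l : List Int) : (prefNeg l 3 || hasOsc l) = hasOsc l := by
  match l with
  | [] => simp [prefNeg]
  | [x] => simp [prefNeg]
  | x :: y :: r =>
    rw [hasOsc_cons]
    simp

lemma altGo_eq (l : List Int) (c : Nat) (hc : c ≤ 2) :
    altGo l c = (prefNeg l (3 - c) || hasOsc l) := by
  induction l generalizing c with
  | nil =>
    have h3 : 3 - c = (2 - c) + 1 := by omega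
    simp [altGo, hasOsc, h3, prefNeg]
  | cons x l ih =>
    cases l with
    | nil =>
      have h3 : 3 - c = (2 - c) + 1 := by omega
      simp [altGo, hasOsc, h3, prefNeg]
    | cons y r =>
      rw [hasOsc_cons]
      by_cases hxy : x = -y
      · subst hxy
        simp only [altGo, beq_self_eq_true, if_true]
        interval_cases c
        · -- c = 0
          have := ih 1 (by omega)
          rw [if_neg (by decide), this]
          simp [prefNeg]
        · -- c = 1
          have := ih 2 (by omega)
          rw [if_neg (by decide), this]
          simp only [prefNeg, beq_self_eq_true, Bool.true_and]
          show (prefNeg (y :: r) 1 || hasOsc (y :: r)) =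
               (prefNeg (y :: r) 1 || (prefNeg (y :: r) 2 || hasOsc (y :: r)))
          by_cases h2 : prefNeg (y :: r) 2 = true
          · have h1 := prefNeg_succ_imp (y :: r) 1 h2
            simp [h1, h2]
          · simp [Bool.eq_false_iff.mpr h2]
        · -- c = 2
          simp [prefNeg]
      · have hb : (x == -y) = false := by simp [hxy]
        simp only [altGo, hb]
        rw [ih 0 (by omega)]
        have h3 : 3 - c = (2 - c) + 1 := by omega
        simp only [h3, prefNeg, hb, Bool.false_and, Bool.false_or]
        rw [prefNeg_or_hasOsc]
        simp

lemma alt_eq_hasOsc (l : List Int) : is_oscillating_py_alt l = hasOsc l := by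
  unfold is_oscillating_py_alt
  rw [altGo_eq l 0 (by omega)]
  exact prefNeg_or_hasOsc l

lemma hasOsc_short (l : List Int) (h : l.length < 4) : hasOsc l = false := by
  match l with
  | [] => rfl
  | [_] => rfl
  | [_, _] => rfl
  | [_, _, _] => rfl
  | _ :: _ :: _ :: _ :: _ => exact absurd h (by simp)

lemma rangeAny_eq (l : List Int) :
    (List.range (l.length - 3)).any (fun k => wcheck ((l.drop k).take 4)) = hasOsc l := by
  induction l with
  | nil => simp [hasOsc]
  | cons x l ih =>
    match l, ih with
    | [], _ => simp [hasOsc]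
    | [_], _ => simp [hasOsc]
    | [_, _], _ => simp [hasOsc]
    | y :: z :: w :: t, ih =>
      have hlen : (x :: y :: z :: w :: t).length - 3 = ((y :: z :: w :: t).length - 3) + 1 := by
        simp
      rw [hlen, List.range_succ_eq_map, List.any_cons, List.any_map]
      have hhead : wcheck (((x :: y :: z :: w :: t).drop 0).take 4)
          = (x == -y && (y == -z && z == -w)) := by
        simp only [List.drop_zero]
        exact win3 x y z w
      rw [hhead]
      simp only [Function.comp_def, List.drop_succ_cons]
      rw [ih]
      simp [hasOsc, Bool.and_assoc]

lemma a_eq_hasOsc (l : List Int) : is_oscillating_py l = hasOsc l := by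
  unfold is_oscillating_py
  by_cases h : l.length < 4
  · rw [if_pos h, hasOsc_short l h]
  · rw [if_neg h]
    rw [← rangeAny_eq l]
    rw [PySem.List.pyRange_one, List.any_map]
    have hto : ((l.length : Int) - 3 - 0).toNat = l.length - 3 := by omega
    rw [hto]
    have hfun : ((fun i => wcheck (PySem.List.slice l (some i) (some (i + 4)))) ∘
          (fun k : Nat => (0 : Int) + (k : Int)))
        = (fun k : Nat => wcheck ((l.drop k).take 4)) := by
      funext k
      simp only [Function.comp_def, zero_add]
      have h4 : ((k : Int) + 4) = ((k + 4 : Nat) : Int) := by push_cast; ring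
      rw [h4, PySem.List.slice_natCast]
      simp
    rw [hfun]

-- ===== VERDICT (by name: the statement is the Claim_ definition above) =====
theorem is_oscillating_py_spec : Claim_equal_is_oscillating_py := by
  intro intervals _
  unfold Spec_is_oscillating_py
  rw [a_eq_hasOsc, alt_eq_hasOsc]
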